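-- pv_equiv track=rewrite | github.com/23EG105Q28/AI-Smart-Interviewer | web_app.py | generate_enhanced_questions_from_keywords
-- ===== SOURCE A (Python) =====
-- def generate_enhanced_questions_from_keywords(resume_text):
--     """Generate questions based on keywords found in resume"""
--     text_lower = resume_text.lower()
--     questions = []
--
--     # Always start with introduction
--     questions.append("Thank you for joining today. Let's start - can you walk me through your professional background?")
--
--     # Check for specific technologies/skills
--     if any(word in text_lower for word in ['python', 'java', 'javascript', 'c++', 'programming']):
--         questions.append("I see you have programming experience. Can you describe a challenging technical problem you solved and your approach?")
--
--     if any(word in text_lower for word in ['ai', 'machine learning', 'deep learning', 'neural network']):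
--         questions.append("You've worked with AI and machine learning. Can you tell me about a specific ML project and the impact it had?")
--
--     if any(word in text_lower for word in ['team', 'lead', 'manage', 'collaboration']):
--         questions.append("Tell me about a time when you had to work with a difficult team member. How did you handle it?")
--
--     if any(word in text_lower for word in ['project', 'developed', 'built', 'created']):
--         questions.append("Walk me through your most successful project from start to finish. What made it successful?")
--
--     # Generic but important questions
--     questions.append("What motivates you in your professional life, and how do you handle setbacks?")
--     questions.append("Where do you see yourself in 3-5 years, and why is this role the right next step?")
--
--     return questions[:6]
-- ===== SOURCE B (Python) =====
-- RULE_KEYWORDS = [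
--     ['python', 'java', 'javascript', 'c++', 'programming'],
--     ['ai', 'machine learning', 'deep learning', 'neural network'],
--     ['team', 'lead', 'manage', 'collaboration'],
--     ['project', 'developed', 'built', 'created'],
-- ]
--
-- RULE_QUESTIONS = [
--     "I see you have programming experience. Can you describe a challenging technical problem you solved and your approach?",
--     "You've worked with AI and machine learning. Can you tell me about a specific ML project and the impact it had?",
--     "Tell me about a time when you had to work with a difficult team member. How did you handle it?",
--     "Walk me through your most successful project from start to finish. What made it successful?",
-- ]
--
--
-- def _matched_rules(t):
--     """One left-to-right scan of the text: at each position, record every rule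
--     that has a keyword starting there (multi-pattern scan instead of one
--     substring search per keyword)."""
--     matched = set()
--     for i in range(len(t)):
--         suffix = t[i:]
--         for r, kws in enumerate(RULE_KEYWORDS):
--             if any(suffix.startswith(k) for k in kws):
--                 matched.add(r)
--     return matched
--
--
-- def generate_enhanced_questions_from_keywords(resume_text):
--     matched = _matched_rules(resume_text.lower())
--     questions = ["Thank you for joining today. Let's start - can you walk me through your professional background?"]
--     questions += [RULE_QUESTIONS[r] for r in range(4) if r in matched]
--     questions += ["What motivates you in your professional life, and how do you handle setbacks?",
--                   "Where do you see yourself in 3-5 years, and why is this role the right next step?"]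
--     return questions[:6]
-- ===== Notes on version B (the rewrite author's own statement) =====
-- stated objective: alternative
-- what changed: Replaces the four per-keyword substring searches over the whole text with a single left-to-right scan that, at each position, records in a matched-rule set which rules have a keyword starting there; the question list is then assembled by selecting from a question table by rule index.
import Mathlib
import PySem

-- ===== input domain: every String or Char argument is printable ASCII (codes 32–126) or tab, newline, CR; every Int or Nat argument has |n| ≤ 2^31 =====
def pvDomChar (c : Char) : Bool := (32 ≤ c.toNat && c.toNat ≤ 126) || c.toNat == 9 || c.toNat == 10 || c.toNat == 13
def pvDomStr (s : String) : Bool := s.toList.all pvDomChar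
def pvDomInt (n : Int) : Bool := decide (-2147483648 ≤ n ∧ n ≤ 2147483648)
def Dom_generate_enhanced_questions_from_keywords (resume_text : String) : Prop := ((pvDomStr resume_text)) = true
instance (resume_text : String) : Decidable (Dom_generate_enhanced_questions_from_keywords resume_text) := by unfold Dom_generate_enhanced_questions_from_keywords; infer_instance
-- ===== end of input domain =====

-- B replaces A's per-keyword substring tests with one left-to-right scan of the text that
-- collects the set of matched rule indices, then assembles the questions from a table.

-- ===== PORT A =====
def generate_enhanced_questions_from_keywords (resume_text : String) : List String :=
  let text_lower := PySem.Str.lower resume_text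
  let questions : List String := []
  let questions := questions ++ ["Thank you for joining today. Let's start - can you walk me through your professional background?"]
  let questions := if (["python", "java", "javascript", "c++", "programming"].any (fun w => PySem.Str.isIn w text_lower)) then
      questions ++ ["I see you have programming experience. Can you describe a challenging technical problem you solved and your approach?"]
    else questions
  let questions := if (["ai", "machine learning", "deep learning", "neural network"].any (fun w => PySem.Str.isIn w text_lower)) then
      questions ++ ["You've worked with AI and machine learning. Can you tell me about a specific ML project and the impact it had?"]
    else questions
  let questions := if (["team", "lead", "manage", "collaboration"].any (fun w => PySem.Str.isIn w text_lower)) then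
      questions ++ ["Tell me about a time when you had to work with a difficult team member. How did you handle it?"]
    else questions
  let questions := if (["project", "developed", "built", "created"].any (fun w => PySem.Str.isIn w text_lower)) then
      questions ++ ["Walk me through your most successful project from start to finish. What made it successful?"]
    else questions
  let questions := questions ++ ["What motivates you in your professional life, and how do you handle setbacks?"]
  let questions := questions ++ ["Where do you see yourself in 3-5 years, and why is this role the right next step?"]
  PySem.List.slice questions none (some 6)

-- ===== PORT B =====
def pvRuleKeywords : List (List String) :=
  [["python", "java", "javascript", "c++", "programming"],
   ["ai", "machine learning", "deep learning", "neural network"],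
   ["team", "lead", "manage", "collaboration"],
   ["project", "developed", "built", "created"]]

def pvRuleQuestions : List String :=
  ["I see you have programming experience. Can you describe a challenging technical problem you solved and your approach?",
   "You've worked with AI and machine learning. Can you tell me about a specific ML project and the impact it had?",
   "Tell me about a time when you had to work with a difficult team member. How did you handle it?",
   "Walk me through your most successful project from start to finish. What made it successful?"]

-- Source B's _matched_rules: one scan over the positions of t; at each position record the
-- rules with a keyword starting there.
def pvMatchedRules (t : String) : PySem.Set Int :=
  (PySem.List.pyRange 0 (PySem.Str.len t) 1).foldl
    (fun matched i =>
      let suffix := PySem.Str.slice t (some i) none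
      (PySem.List.enumerate pvRuleKeywords).foldl
        (fun m p => if p.2.any (fun k => PySem.Str.startswith suffix k) then PySem.Set.add m p.1 else m)
        matched)
    PySem.Set.empty

def generate_enhanced_questions_from_keywords_alt (resume_text : String) : List String :=
  let matched := pvMatchedRules (PySem.Str.lower resume_text)
  let questions : List String := ["Thank you for joining today. Let's start - can you walk me through your professional background?"]
  let questions := questions ++ ((PySem.List.pyRange 0 4 1).foldl
      (fun qs r => if PySem.Set.contains matched r then qs ++ [PySem.List.pyGetD pvRuleQuestions r ""] else qs) [])
  let questions := questions ++
    ["What motivates you in your professional life, and how do you handle setbacks?",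
     "Where do you see yourself in 3-5 years, and why is this role the right next step?"]
  PySem.List.slice questions none (some 6)

-- ===== PRECONDITION & SPEC =====
def Spec_generate_enhanced_questions_from_keywords (resume_text : String) (out : List String) : Prop := out = generate_enhanced_questions_from_keywords_alt resume_text
instance (resume_text : String) (out : List String) : Decidable (Spec_generate_enhanced_questions_from_keywords resume_text out) := by unfold Spec_generate_enhanced_questions_from_keywords; infer_instance

-- ===== CLAIM =====
def Claim_equal_generate_enhanced_questions_from_keywords : Prop := ∀ (resume_text : String), Dom_generate_enhanced_questions_from_keywords resume_text → Spec_generate_enhanced_questions_from_keywords resume_text (generate_enhanced_questions_from_keywords resume_text)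

-- ===== LEMMAS AND PROOFS =====

-- 'does a keyword of kws start at position i of t' — the inner condition of pvMatchedRules.
def pvFires (t : String) (kws : List String) (i : Int) : Bool :=
  kws.any (fun k => PySem.Str.startswith (PySem.Str.slice t (some i) none) k)

lemma pv_mem_ite_add (m : PySem.Set Int) (c : Bool) (y x : Int) :
    (x ∈ (if c then PySem.Set.add m y else m)) ↔ x ∈ m ∨ (c = true ∧ x = y) := by
  cases c <;> simp [PySem.Set.mem_add]

lemma pv_mem_inner (t : String) (i : Int) (ps : List (Int × List String)) (m : PySem.Set Int) (x : Int) :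
    (x ∈ ps.foldl (fun m p => if pvFires t p.2 i then PySem.Set.add m p.1 else m) m) ↔
      x ∈ m ∨ ∃ p ∈ ps, pvFires t p.2 i = true ∧ x = p.1 := by
  induction ps generalizing m with
  | nil => simp
  | cons p ps ih =>
      simp only [List.foldl_cons, ih, pv_mem_ite_add, List.mem_cons]
      constructor
      · rintro (((h | h) | h))
        · exact Or.inl h
        · exact Or.inr ⟨p, Or.inl rfl, h.1, h.2⟩
        · obtain ⟨q, hq, h⟩ := h
          exact Or.inr ⟨q, Or.inr hq, h⟩
      · rintro (h | ⟨q, (rfl | hq), h⟩)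
        · exact Or.inl (Or.inl h)
        · exact Or.inl (Or.inr ⟨h.1, h.2⟩)
        · exact Or.inr ⟨q, hq, h⟩

lemma pv_mem_outer (t : String) (js : List Int) (m : PySem.Set Int) (x : Int) :
    (x ∈ js.foldl
      (fun matched i =>
        let suffix := PySem.Str.slice t (some i) none
        (PySem.List.enumerate pvRuleKeywords).foldl
          (fun m p => if p.2.any (fun k => PySem.Str.startswith suffix k) then PySem.Set.add m p.1 else m)
          matched) m) ↔
      x ∈ m ∨ ∃ i ∈ js, ∃ p ∈ PySem.List.enumerate pvRuleKeywords, pvFires t p.2 i = true ∧ x = p.1 := by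
  induction js generalizing m with
  | nil => simp
  | cons j js ih =>
      simp only [List.foldl_cons, ih, List.mem_cons]
      rw [show (fun (m : PySem.Set Int) (p : Int × List String) =>
            if p.2.any (fun k => PySem.Str.startswith (PySem.Str.slice t (some j) none) k)
            then PySem.Set.add m p.1 else m)
          = (fun m p => if pvFires t p.2 j then PySem.Set.add m p.1 else m) from rfl]
      rw [pv_mem_inner]
      constructor
      · rintro ((h | ⟨p, hp, h⟩) | ⟨i, hi, h⟩)
        · exact Or.inl h
        · exact Or.inr ⟨j, Or.inl rfl, p, hp, h⟩
        · exact Or.inr ⟨i, Or.inr hi, h⟩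
      · rintro (h | ⟨i, (rfl | hi), h⟩)
        · exact Or.inl (Or.inl h)
        · exact Or.inl (Or.inr h)
        · exact Or.inr ⟨i, hi, h⟩

-- a nonempty keyword starts at some scanned position iff it is a substring
lemma pv_exists_pos_startswith_iff (t k : String) (hk : k.toList ≠ []) :
    (∃ i ∈ PySem.List.pyRange 0 (PySem.Str.len t) 1,
        PySem.Str.startswith (PySem.Str.slice t (some i) none) k = true) ↔
      PySem.Str.isIn k t = true := by
  rw [PySem.Str.isIn_eq, ← PySem.Chars.exists_prefix_drop_iff_isIn]
  constructor
  · rintro ⟨i, hi, hs⟩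
    rw [PySem.List.mem_pyRange_one] at hi
    refine ⟨i.toNat, ?_⟩
    rw [PySem.Str.startswith_eq, PySem.Str.toList_slice, PySem.Chars.slice_eq_listSlice,
        PySem.List.slice_from t.toList hi.1] at hs
    exact (PySem.Chars.startswith_iff _ _).1 hs
  · rintro ⟨j, hj⟩
    have hjlt : j < t.toList.length := by
      by_contra hge
      have : t.toList.drop j = [] := List.drop_eq_nil_of_le (by omega)
      rw [this] at hj
      exact hk (List.prefix_nil.mp hj)
    refine ⟨(j : Int), ?_, ?_⟩
    · rw [PySem.List.mem_pyRange_one, PySem.Str.len_eq]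
      exact ⟨by positivity, by exact_mod_cast hjlt⟩
    · rw [PySem.Str.startswith_eq, PySem.Str.toList_slice, PySem.Chars.slice_eq_listSlice,
          PySem.List.slice_from_natCast]
      exact (PySem.Chars.startswith_iff _ _).2 hj

-- a rule fires at some scanned position iff one of its keywords is a substring
lemma pv_fires_any_iff (t : String) (kws : List String) (hk : ∀ k ∈ kws, k.toList ≠ []) :
    (∃ i ∈ PySem.List.pyRange 0 (PySem.Str.len t) 1, pvFires t kws i = true) ↔
      kws.any (fun w => PySem.Str.isIn w t) = true := by
  simp only [pvFires, List.any_eq_true]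
  constructor
  · rintro ⟨i, hi, k, hkmem, hs⟩
    exact ⟨k, hkmem, (pv_exists_pos_startswith_iff t k (hk k hkmem)).1 ⟨i, hi, hs⟩⟩
  · rintro ⟨k, hkmem, hin⟩
    obtain ⟨i, hi, hs⟩ := (pv_exists_pos_startswith_iff t k (hk k hkmem)).2 hin
    exact ⟨i, hi, k, hkmem, hs⟩

-- membership of rule r in the scan's matched set = A's guard for rule r
lemma pv_matched_iff (t : String) (r : Int) (kws : List String)
    (h2 : ∀ p ∈ PySem.List.enumerate pvRuleKeywords, p.1 = r → p.2 = kws)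
    (hr : (r, kws) ∈ PySem.List.enumerate pvRuleKeywords)
    (hk : ∀ k ∈ kws, k.toList ≠ []) :
    PySem.Set.contains (pvMatchedRules t) r = kws.any (fun w => PySem.Str.isIn w t) := by
  rw [Bool.eq_iff_iff]
  have hmem : PySem.Set.contains (pvMatchedRules t) r = true ↔ r ∈ pvMatchedRules t := by
    simp [PySem.Set.contains]
  rw [hmem, pvMatchedRules, pv_mem_outer, ← pv_fires_any_iff t kws hk]
  constructor
  · rintro (h | ⟨i, hi, p, hp, hf, rfl⟩)
    · simp [PySem.Set.empty] at h
    · rw [h2 p hp rfl] at hf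
      exact ⟨i, hi, hf⟩
  · rintro ⟨i, hi, hf⟩
    exact Or.inr ⟨i, hi, (r, kws), hr, hf, rfl⟩

-- ===== VERDICT =====
theorem generate_enhanced_questions_from_keywords_spec : Claim_equal_generate_enhanced_questions_from_keywords := by
  intro s _
  unfold Spec_generate_enhanced_questions_from_keywords
  simp only [generate_enhanced_questions_from_keywords, generate_enhanced_questions_from_keywords_alt]
  rw [show PySem.List.pyRange 0 4 1 = [0, 1, 2, 3] from rfl]
  simp only [List.foldl]
  rw [pv_matched_iff (PySem.Str.lower s) 0 ["python", "java", "javascript", "c++", "programming"] (by decide) (by decide) (by decide),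
      pv_matched_iff (PySem.Str.lower s) 1 ["ai", "machine learning", "deep learning", "neural network"] (by decide) (by decide) (by decide),
      pv_matched_iff (PySem.Str.lower s) 2 ["team", "lead", "manage", "collaboration"] (by decide) (by decide) (by decide),
      pv_matched_iff (PySem.Str.lower s) 3 ["project", "developed", "built", "created"] (by decide) (by decide) (by decide)]
  split_ifs <;> rfl
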